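-- pv_equiv track=rewrite | github.com/ryook/pick_and_choose | app.py | count_yes
-- ===== SOURCE A (Python) =====
-- def count_yes(data):
--     rtn = []
--     if data == []:
--         return None
--     image_count = len(data[0])
--     for i in range(image_count):
--         i_image_yes_count = [d[i] for d in data].count('1')
--         rtn.append({'id': i + 1, 'count': i_image_yes_count})
--     return rtn
-- ===== SOURCE B (Python) =====
-- def count_yes(data):
--     if not data:
--         return None
--     n = len(data[0])
--     counts = [0] * n
--     for d in data:
--         counts = [c + (d[i] == '1') for i, c in enumerate(counts)]
--     return [{'id': i + 1, 'count': c} for i, c in enumerate(counts)]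
-- ===== Notes on version B (the rewrite author's own statement) =====
-- stated objective: alternative
-- what changed: B makes one row-major pass accumulating a per-column counter list instead of A's per-column scan of all rows for each index
import Mathlib
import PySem

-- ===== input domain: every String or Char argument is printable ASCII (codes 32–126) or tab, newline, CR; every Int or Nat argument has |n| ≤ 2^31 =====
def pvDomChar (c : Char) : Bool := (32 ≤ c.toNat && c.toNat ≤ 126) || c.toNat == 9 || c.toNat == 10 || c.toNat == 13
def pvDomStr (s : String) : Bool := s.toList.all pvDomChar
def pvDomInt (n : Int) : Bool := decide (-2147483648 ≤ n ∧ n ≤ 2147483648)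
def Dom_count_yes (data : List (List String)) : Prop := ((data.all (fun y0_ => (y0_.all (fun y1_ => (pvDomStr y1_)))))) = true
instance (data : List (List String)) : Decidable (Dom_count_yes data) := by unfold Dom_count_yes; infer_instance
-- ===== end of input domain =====

-- B replaces A's per-column scan of all rows (one .count pass per index) by a single
-- row-major pass accumulating a per-column counter list (objective: alternative).

-- ===== PORT A =====
def count_yes (data : List (List String)) : Option (List (List (String × Int))) :=
  if data = [] then none
  else
    let image_count : Nat := (data.headD []).length
    let rtn := (PySem.List.pyRange 0 image_count 1).foldl
      (fun rtn i =>
        let c : Int := ((data.map (fun d => PySem.List.pyGetD d i "")).count "1" : Nat)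
        rtn ++ [[("id", i + 1), ("count", c)]]) []
    some rtn

-- ===== PORT B =====
def count_yes_alt (data : List (List String)) : Option (List (List (String × Int))) :=
  match data with
  | [] => none
  | d0 :: _ =>
    let n := d0.length
    let counts := data.foldl
      (fun counts d => (PySem.List.enumerate counts).map
        (fun ic => ic.2 + (if PySem.List.pyGetD d ic.1 "" = "1" then (1 : Int) else 0)))
      (List.replicate n (0 : Int))
    some ((PySem.List.enumerate counts).map (fun ic => [("id", ic.1 + 1), ("count", ic.2)]))

-- ===== PRECONDITION & SPEC =====
-- Pre_ excludes exactly the inputs on which Python A raises IndexError: a nonempty data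
-- where some row is shorter than the first row (the loop indexes every row up to len(data[0])).
def Pre_count_yes (data : List (List String)) : Prop :=
  ∀ d ∈ data, (data.headD []).length ≤ d.length
instance (data : List (List String)) : Decidable (Pre_count_yes data) := by
  unfold Pre_count_yes; infer_instance

def pvWitness_count_yes : List (List String) := [["1", "0"], ["0", "1"]]

def Spec_count_yes (data : List (List String)) (out : Option (List (List (String × Int)))) : Prop := out = count_yes_alt data
instance (data : List (List String)) (out : Option (List (List (String × Int)))) : Decidable (Spec_count_yes data out) := by unfold Spec_count_yes; infer_instance

-- ===== CLAIM (what is proved, stated in full; the proofs are below) =====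
def Claim_equal_count_yes : Prop := ∀ (data : List (List String)), Dom_count_yes data → Pre_count_yes data → Spec_count_yes data (count_yes data)

-- ===== LEMMAS AND PROOFS =====

-- column count (A's inner expression), indexed by a Nat column index
def pvCol (data : List (List String)) (k : Nat) : Int :=
  ((data.map (fun d => PySem.List.pyGetD d (k : Int) "")).count "1" : Nat)

def pvStep (d : List String) (counts : List Int) : List Int :=
  (PySem.List.enumerate counts).map
    (fun ic => ic.2 + (if PySem.List.pyGetD d ic.1 "" = "1" then (1 : Int) else 0))

theorem pvStep_length (d : List String) (counts : List Int) :
    (pvStep d counts).length = counts.length := by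
  simp [pvStep, PySem.List.length_enumerate]

theorem pvFold_length (data : List (List String)) (counts : List Int) :
    (data.foldl (fun c d => pvStep d c) counts).length = counts.length := by
  induction data generalizing counts with
  | nil => rfl
  | cons d rest ih => simp [List.foldl_cons, ih, pvStep_length]

theorem pvStep_getElem? (d : List String) (counts : List Int) (k : Nat) :
    (pvStep d counts)[k]? =
      counts[k]?.map (fun c => c + (if PySem.List.pyGetD d (k : Int) "" = "1" then (1 : Int) else 0)) := by
  cases h : counts[k]? <;>
    simp [pvStep, List.getElem?_map, PySem.List.getElem?_enumerate, h]

theorem pvFold_getElem? (data : List (List String)) (counts : List Int) (k : Nat) :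
    (data.foldl (fun c d => pvStep d c) counts)[k]? =
      counts[k]?.map (fun c => c + pvCol data k) := by
  induction data generalizing counts with
  | nil =>
    cases h : counts[k]? <;> simp [pvCol, h]
  | cons d rest ih =>
    rw [List.foldl_cons, ih, pvStep_getElem?]
    cases h : counts[k]? with
    | none => simp
    | some c =>
      simp only [Option.map_some]
      congr 1
      simp only [pvCol, List.map_cons, List.count_cons]
      push_cast
      by_cases hd : PySem.List.pyGetD d (k : Int) "" = "1" <;> simp [hd] <;> ring

theorem pvFoldl_append (l : List Int) (f : Int → List (String × Int)) (acc : List (List (String × Int))) :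
    l.foldl (fun r i => r ++ [f i]) acc = acc ++ l.map f := by
  induction l generalizing acc with
  | nil => simp
  | cons x xs ih => simp [List.foldl_cons, ih]

-- ===== VERDICT (by name: the statement is the Claim_ definition above) =====
theorem count_yes_spec : Claim_equal_count_yes := by
  intro data _ _
  unfold Spec_count_yes count_yes count_yes_alt
  cases data with
  | nil => simp
  | cons d0 rest =>
    simp only [reduceCtorEq, if_false, List.headD_cons]
    set data := d0 :: rest with hdata
    set n := d0.length with hn
    rw [show (fun (counts : List Int) (d : List String) =>
          (PySem.List.enumerate counts).map
            (fun ic => ic.2 + (if PySem.List.pyGetD d ic.1 "" = "1" then (1 : Int) else 0)))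
        = (fun c d => pvStep d c) from rfl]
    rw [pvFoldl_append, List.nil_append]
    congr 1
    apply List.ext_getElem?
    intro k
    by_cases hk : k < n
    · rw [PySem.List.getElem?_map_pyRange_zero _ _ _ hk]
      rw [List.getElem?_map, PySem.List.getElem?_enumerate, pvFold_getElem?]
      have hrep : (List.replicate n (0 : Int))[k]? = some 0 := by
        simp [List.getElem?_replicate, hk]
      rw [hrep]
      simp [pvCol]
    · have hlen1 : ((PySem.List.pyRange 0 (n : Int) 1).length) = n := by
        simp [PySem.List.length_pyRange_one]
      have hlen2 : (data.foldl (fun c d => pvStep d c) (List.replicate n (0 : Int))).length = n := by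
        rw [pvFold_length]; simp
      rw [List.getElem?_eq_none (by simp [hlen1]; omega),
          List.getElem?_eq_none (by simp [PySem.List.length_enumerate, hlen2]; omega)]
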